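-- pv_equiv track=rewrite | github.com/invest-alert/invest-alert | app/services/article_summary_service.py | _summary_status_for_headlines
-- ===== SOURCE A (Python) =====
-- from typing import Any
--
-- SUMMARY_STATUS_NOT_AVAILABLE = "not_available"
--
-- SUMMARY_STATUS_COMPLETED = "completed"
--
-- SUMMARY_STATUS_PARTIAL = "partial"
--
-- SUMMARY_STATUS_FAILED = "failed"
--
-- HEADLINE_STATUS_COMPLETED = "completed"
--
-- HEADLINE_STATUS_FAILED = "failed"
--
-- def _summary_status_for_headlines(headlines: list[dict[str, Any]]) -> str:
--     if not headlines:
--         return SUMMARY_STATUS_NOT_AVAILABLE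
--
--     completed_count = sum(1 for headline in headlines if headline.get("summary_status") == HEADLINE_STATUS_COMPLETED)
--     failed_count = sum(1 for headline in headlines if headline.get("summary_status") == HEADLINE_STATUS_FAILED)
--     if completed_count and not failed_count:
--         return SUMMARY_STATUS_COMPLETED
--     if completed_count and failed_count:
--         return SUMMARY_STATUS_PARTIAL
--     return SUMMARY_STATUS_FAILED
-- ===== SOURCE B (Python) =====
-- SUMMARY_STATUS_NOT_AVAILABLE = "not_available"
-- SUMMARY_STATUS_COMPLETED = "completed"
-- SUMMARY_STATUS_PARTIAL = "partial"
-- SUMMARY_STATUS_FAILED = "failed"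
-- HEADLINE_STATUS_COMPLETED = "completed"
-- HEADLINE_STATUS_FAILED = "failed"
--
-- def _summary_status_for_headlines(headlines):
--     if not headlines:
--         return SUMMARY_STATUS_NOT_AVAILABLE
--     has_completed = False
--     has_failed = False
--     for headline in headlines:
--         status = headline.get("summary_status")
--         if status == HEADLINE_STATUS_COMPLETED:
--             has_completed = True
--         elif status == HEADLINE_STATUS_FAILED:
--             has_failed = True
--         if has_completed and has_failed:
--             break
--     if has_completed and not has_failed:
--         return SUMMARY_STATUS_COMPLETED
--     if has_completed and has_failed:
--         return SUMMARY_STATUS_PARTIAL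
--     return SUMMARY_STATUS_FAILED
-- ===== Notes on version B (the rewrite author's own statement) =====
-- stated objective: alternative
-- what changed: Replaces A's two independent counting passes with a single flag-tracking pass over the headlines that breaks early once both a completed and a failed headline have been seen.
import Mathlib
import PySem

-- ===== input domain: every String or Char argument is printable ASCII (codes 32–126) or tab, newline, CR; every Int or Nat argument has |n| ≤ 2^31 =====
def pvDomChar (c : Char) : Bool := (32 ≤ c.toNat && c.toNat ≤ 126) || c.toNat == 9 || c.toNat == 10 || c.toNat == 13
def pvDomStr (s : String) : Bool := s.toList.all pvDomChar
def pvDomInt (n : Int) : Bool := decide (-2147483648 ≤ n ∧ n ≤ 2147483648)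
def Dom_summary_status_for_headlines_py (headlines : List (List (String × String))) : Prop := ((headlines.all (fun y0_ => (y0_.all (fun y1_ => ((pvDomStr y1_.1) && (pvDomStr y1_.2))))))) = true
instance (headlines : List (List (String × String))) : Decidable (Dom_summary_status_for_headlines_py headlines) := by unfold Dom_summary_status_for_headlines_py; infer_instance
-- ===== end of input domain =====

-- B replaces A's two independent counting passes with one flag-tracking pass (early break); same return value, same cost class.

-- ===== PORT A =====
-- A: two generator-sum counting passes, then a branch chain on the counts.
def summary_status_for_headlines_py (headlines : List (List (String × String))) : String :=
  if headlines = [] then "not_available"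
  else
    let completed_count : Nat := headlines.foldl
      (fun acc h => if (PySem.Dict.mk h).get? "summary_status" = some "completed" then acc + 1 else acc) 0
    let failed_count : Nat := headlines.foldl
      (fun acc h => if (PySem.Dict.mk h).get? "summary_status" = some "failed" then acc + 1 else acc) 0
    if completed_count ≠ 0 ∧ failed_count = 0 then "completed"
    else if completed_count ≠ 0 ∧ failed_count ≠ 0 then "partial"
    else "failed"

-- ===== PORT B =====
-- B: one loop carrying (has_completed, has_failed), breaking once both are set.
def ssfhGo : Bool → Bool → List (List (String × String)) → Bool × Bool
  | hc, hf, [] => (hc, hf)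
  | hc, hf, h :: rest =>
    let status := (PySem.Dict.mk h).get? "summary_status"
    let p : Bool × Bool :=
      if status = some "completed" then (true, hf)
      else if status = some "failed" then (hc, true)
      else (hc, hf)
    if p.1 && p.2 then p else ssfhGo p.1 p.2 rest

def summary_status_for_headlines_py_alt (headlines : List (List (String × String))) : String :=
  if headlines = [] then "not_available"
  else
    let p := ssfhGo false false headlines
    if p.1 && !p.2 then "completed"
    else if p.1 && p.2 then "partial"
    else "failed"

-- ===== PRECONDITION & SPEC =====
def Spec_summary_status_for_headlines_py (headlines : List (List (String × String))) (out : String) : Prop := out = summary_status_for_headlines_py_alt headlines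
instance (headlines : List (List (String × String))) (out : String) : Decidable (Spec_summary_status_for_headlines_py headlines out) := by unfold Spec_summary_status_for_headlines_py; infer_instance

-- ===== CLAIM (what is proved, stated in full; the proofs are below) =====
def Claim_equal_summary_status_for_headlines_py : Prop := ∀ (headlines : List (List (String × String))), Dom_summary_status_for_headlines_py headlines → Spec_summary_status_for_headlines_py headlines (summary_status_for_headlines_py headlines)

-- ===== LEMMAS AND PROOFS =====

-- B's loop returns (hc OR some headline completed, hf OR some headline failed);
-- the early break only fires when both components are already true.
theorem ssfhGo_eq (l : List (List (String × String))) (hc hf : Bool) :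
    ssfhGo hc hf l =
      (hc || l.any (fun h => decide ((PySem.Dict.mk h).get? "summary_status" = some "completed")),
       hf || l.any (fun h => decide ((PySem.Dict.mk h).get? "summary_status" = some "failed"))) := by
  induction l generalizing hc hf with
  | nil => simp [ssfhGo]
  | cons h t ih =>
    simp only [ssfhGo, List.any_cons]
    by_cases h1 : (PySem.Dict.mk h).get? "summary_status" = some "completed"
    · have h2 : ¬ ((PySem.Dict.mk h).get? "summary_status" = some "failed") := by simp [h1]
      cases hf <;> simp [h1, h2, ih]
    · by_cases h2 : (PySem.Dict.mk h).get? "summary_status" = some "failed"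
      · cases hc <;> simp [h1, h2, ih]
      · cases hc <;> cases hf <;> simp [h1, h2, ih]

-- A's counting fold is an offset plus countP.
theorem foldl_count_eq (p : List (String × String) → Prop) [DecidablePred p]
    (l : List (List (String × String))) (n : Nat) :
    l.foldl (fun acc h => if p h then acc + 1 else acc) n = n + l.countP (fun h => decide (p h)) := by
  induction l generalizing n with
  | nil => simp
  | cons h t ih =>
    by_cases hp : p h <;> simp [hp, ih] <;> omega

theorem count_ne_zero_iff_any (p : List (String × String) → Prop) [DecidablePred p]
    (l : List (List (String × String))) :
    (l.countP (fun h => decide (p h)) ≠ 0) ↔ (l.any (fun h => decide (p h)) = true) := by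
  rw [Ne, List.countP_eq_zero]
  simp [List.any_eq_true]

-- ===== VERDICT (by name: the statement is the Claim_ definition above) =====
theorem summary_status_for_headlines_py_spec : Claim_equal_summary_status_for_headlines_py := by
  intro headlines _
  unfold Spec_summary_status_for_headlines_py
  unfold summary_status_for_headlines_py summary_status_for_headlines_py_alt
  by_cases hnil : headlines = []
  · simp [hnil]
  · simp only [hnil, if_false]
    rw [ssfhGo_eq]
    rw [foldl_count_eq (fun h => (PySem.Dict.mk h).get? "summary_status" = some "completed")]
    rw [foldl_count_eq (fun h => (PySem.Dict.mk h).get? "summary_status" = some "failed")]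
    simp only [Nat.zero_add]
    have hc := count_ne_zero_iff_any (fun h => (PySem.Dict.mk h).get? "summary_status" = some "completed") headlines
    have hf := count_ne_zero_iff_any (fun h => (PySem.Dict.mk h).get? "summary_status" = some "failed") headlines
    by_cases a1 : headlines.any (fun h => decide ((PySem.Dict.mk h).get? "summary_status" = some "completed")) = true <;>
      by_cases a2 : headlines.any (fun h => decide ((PySem.Dict.mk h).get? "summary_status" = some "failed")) = true <;>
      simp only [List.any_eq_true] at a1 a2 hc hf <;>
      simp [a1, a2, hc, hf]
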